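-- pv_equiv track=rewrite | github.com/Nadolina-Kseniia/PRiTPO | LR2/3_3_Decoder/Decoder.py | decrypt_texts
-- ===== SOURCE A (Python) =====
-- def decrypt_texts(cases):
--     # Известный открытый текст и его структура
--     plain_text = "the quick brown fox jumps over the lazy dog"
--     plain_words = plain_text.split()
--     plain_lengths = [len(word) for word in plain_words]
--
--     results = []
--
--     for current_case in cases:
--         solution_found = False
--         decryption_map = {}
--
--         # Шаг 1: Найти, какая строка в current_case является шифровкой plain_text
--         for line in current_case:
--             words = line.split()
--             if len(words) != len(plain_words):
--                 continue
--
--             # Проверить длины слов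
--             valid_length = True
--             for w, pl in zip(words, plain_lengths):
--                 if len(w) != pl:
--                     valid_length = False
--                     break
--             if not valid_length:
--                 continue
--
--             # Попробовать построить отображение
--             temp_decryption = {}
--             temp_encryption = {}
--             valid_mapping = True
--
--             for cipher_word, plain_word in zip(words, plain_words):
--                 if len(cipher_word) != len(plain_word):
--                     valid_mapping = False
--                     break
--                 for c_char, p_char in zip(cipher_word, plain_word):
--                     if c_char in temp_decryption:
--                         if temp_decryption[c_char] != p_char:
--                             valid_mapping = False
--                             break
--                     else:
--                         if p_char in temp_encryption:
--                             if temp_encryption[p_char] != c_char: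
--                                 valid_mapping = False
--                                 break
--                         else:
--                             temp_decryption[c_char] = p_char
--                             temp_encryption[p_char] = c_char
--                 if not valid_mapping:
--                     break
--
--             if valid_mapping:
--                 decryption_map = temp_decryption
--                 solution_found = True
--                 break
--
--         # Шаг 2: Расшифровать все строки
--         if solution_found:
--             decrypted_case = []
--             for line in current_case:
--                 decrypted_line = []
--                 for char in line:
--                     if char == ' ':
--                         decrypted_line.append(' ')
--                     elif char in decryption_map:
--                         decrypted_line.append(decryption_map[char])
--                     else:
--                         decrypted_case = ["No solution."]
--                         solution_found = False
--                         break
--                 if not solution_found: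
--                     break
--                 decrypted_case.append(''.join(decrypted_line))
--             if solution_found:
--                 results.append(decrypted_case)
--             else:
--                 results.append(["No solution."])
--         else:
--             results.append(["No solution."])
--
--     return results
-- ===== SOURCE B (Python) =====
-- def decrypt_texts(cases):
--     # B: find the plaintext's cipher line by comparing canonical pattern signatures
--     # (first-occurrence index per character, spaces self-mapping) instead of
--     # incrementally growing a pair of consistency dicts.
--     plain_text = "the quick brown fox jumps over the lazy dog"
--
--     def signature(s):
--         first = {}
--         return [-1 if ch == ' ' else first.setdefault(ch, i) for i, ch in enumerate(s)]
--
--     plain_sig = signature(plain_text)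
--
--     def find_map(case):
--         for line in case:
--             joined = ' '.join(line.split())
--             if signature(joined) == plain_sig:
--                 return dict(zip(joined, plain_text))
--         return None
--
--     def decrypt_case(case):
--         d = find_map(case)
--         if d is None:
--             return ["No solution."]
--         try:
--             return [''.join(d[ch] for ch in line) for line in case]
--         except KeyError:
--             return ["No solution."]
--
--     return [decrypt_case(case) for case in cases]
-- ===== Notes on version B (the rewrite author's own statement) =====
-- stated objective: alternative
-- what changed: Phase 1 no longer grows a pair of mutually-checked decrypt/encrypt dicts word by word: B normalises each line's whitespace, compares its canonical pattern signature (first-occurrence index per character, spaces self-mapping) with the plaintext's precomputed signature, and builds the decryption dict in one zip with the plaintext; phase 2 then decrypts via a single dict lookup per character.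
import Mathlib
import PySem

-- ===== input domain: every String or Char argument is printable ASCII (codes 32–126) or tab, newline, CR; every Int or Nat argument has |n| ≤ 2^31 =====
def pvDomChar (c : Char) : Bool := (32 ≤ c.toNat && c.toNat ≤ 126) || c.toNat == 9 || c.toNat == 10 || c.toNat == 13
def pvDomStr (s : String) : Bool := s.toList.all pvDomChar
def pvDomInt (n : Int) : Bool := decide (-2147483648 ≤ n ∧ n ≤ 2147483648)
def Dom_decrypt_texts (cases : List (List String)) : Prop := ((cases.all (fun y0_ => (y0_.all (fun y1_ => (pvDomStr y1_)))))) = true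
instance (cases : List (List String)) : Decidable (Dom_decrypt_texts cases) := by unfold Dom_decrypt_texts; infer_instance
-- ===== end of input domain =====

-- B replaces A's incremental two-dict consistency search with a canonical
-- pattern-signature comparison of each (whitespace-normalised) line against the
-- fixed plaintext; same results, alternative algorithm.


-- ===== PORT A =====
def pvAplainText : String := "the quick brown fox jumps over the lazy dog"
def pvAplainWords : List String := PySem.Str.split₀ pvAplainText
def pvAplainLengths : List Int := pvAplainWords.map (fun w => PySem.Str.len w)

-- 'for w, pl in zip(words, plain_lengths): if len(w) != pl: valid_length = False; break'
def pvAlenLoop : List (String × Int) → Bool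
  | [] => true
  | (w, pl) :: rest => if PySem.Str.len w ≠ pl then false else pvAlenLoop rest

-- inner 'for c_char, p_char in zip(cipher_word, plain_word)' loop (state: dicts + valid flag)
def pvAcharLoop : List (Char × Char) → PySem.Dict Char Char → PySem.Dict Char Char →
    PySem.Dict Char Char × PySem.Dict Char Char × Bool
  | [], dec, enc => (dec, enc, true)
  | (c, p) :: rest, dec, enc =>
    if dec.contains c then
      if dec.getD c ' ' ≠ p then (dec, enc, false)
      else pvAcharLoop rest dec enc
    else if enc.contains p then
      if enc.getD p ' ' ≠ c then (dec, enc, false)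
      else pvAcharLoop rest dec enc
    else pvAcharLoop rest (dec.insert c p) (enc.insert p c)

-- outer 'for cipher_word, plain_word in zip(words, plain_words)' loop
def pvAwordLoop : List (String × String) → PySem.Dict Char Char → PySem.Dict Char Char →
    PySem.Dict Char Char × PySem.Dict Char Char × Bool
  | [], dec, enc => (dec, enc, true)
  | (cw, pw) :: rest, dec, enc =>
    if PySem.Str.len cw ≠ PySem.Str.len pw then (dec, enc, false)
    else
      match pvAcharLoop (cw.toList.zip pw.toList) dec enc with
      | (dec', enc', true) => pvAwordLoop rest dec' enc'
      | (dec', enc', false) => (dec', enc', false)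

-- step 1: scan the lines for the encryption of plain_text
def pvAfind : List String → Option (PySem.Dict Char Char)
  | [] => none
  | line :: rest =>
    let words := PySem.Str.split₀ line
    if words.length ≠ pvAplainWords.length then pvAfind rest
    else if pvAlenLoop (words.zip pvAplainLengths) = false then pvAfind rest
    else
      match pvAwordLoop (words.zip pvAplainWords) PySem.Dict.empty PySem.Dict.empty with
      | (dec, _, true) => some dec
      | (_, _, false) => pvAfind rest

-- step 2, inner char loop ('decrypted_line'); none models the break to "No solution."
def pvAdecLine (dmap : PySem.Dict Char Char) : List Char → List Char → Option (List Char)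
  | [], acc => some acc
  | ch :: rest, acc =>
    if ch = ' ' then pvAdecLine dmap rest (acc ++ [' '])
    else if dmap.contains ch then pvAdecLine dmap rest (acc ++ [dmap.getD ch ' '])
    else none

-- step 2, line loop ('decrypted_case')
def pvAdecCase (dmap : PySem.Dict Char Char) : List String → List String → List String
  | [], acc => acc
  | line :: rest, acc =>
    match pvAdecLine dmap line.toList [] with
    | some cs => pvAdecCase dmap rest (acc ++ [String.ofList cs])
    | none => ["No solution."]

def decrypt_texts (cases : List (List String)) : List (List String) :=
  cases.foldl (fun results currentCase =>
    results ++ [match pvAfind currentCase with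
      | some dmap => pvAdecCase dmap currentCase []
      | none => ["No solution."]]) []

-- ===== PORT B =====
def pvBplainText : String := "the quick brown fox jumps over the lazy dog"
-- '[-1 if ch == ' ' else first.setdefault(ch, i) for i, ch in enumerate(s)]'
def pvBsignature : List Char → PySem.Dict Char Int → Int → List Int
  | [], _, _ => []
  | ch :: rest, first, i =>
    if ch = ' ' then (-1) :: pvBsignature rest first (i + 1)
    else first.getD ch i :: pvBsignature rest (first.setdefault ch i) (i + 1)

def pvBsig (s : List Char) : List Int := pvBsignature s PySem.Dict.empty 0

def pvBplainSig : List Int := pvBsig pvBplainText.toList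

-- find_map: first line whose normalised signature matches gives dict(zip(joined, plain_text))
def pvBfind : List String → Option (PySem.Dict Char Char)
  | [] => none
  | line :: rest =>
    let joined := PySem.Str.join " " (PySem.Str.split₀ line)
    if pvBsig joined.toList = pvBplainSig then
      some ((joined.toList.zip pvBplainText.toList).foldl
        (fun d pr => d.insert pr.1 pr.2) PySem.Dict.empty)
    else pvBfind rest

-- ''.join(d[ch] for ch in line); none models the KeyError
def pvBdecLine (d : PySem.Dict Char Char) : List Char → Option (List Char)
  | [] => some []
  | ch :: rest =>
    match d.get? ch with
    | none => none
    | some p => (pvBdecLine d rest).map (p :: ·)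

def pvBdecCase (d : PySem.Dict Char Char) : List String → Option (List String)
  | [] => some []
  | line :: rest =>
    match pvBdecLine d line.toList with
    | none => none
    | some cs => (pvBdecCase d rest).map (String.ofList cs :: ·)

def pvBdecryptCase (currentCase : List String) : List String :=
  match pvBfind currentCase with
  | none => ["No solution."]
  | some d => (pvBdecCase d currentCase).getD ["No solution."]

def decrypt_texts_alt (cases : List (List String)) : List (List String) :=
  cases.map pvBdecryptCase

-- ===== PRECONDITION & SPEC =====
def Spec_decrypt_texts (cases : List (List String)) (out : List (List String)) : Prop := out = decrypt_texts_alt cases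
instance (cases : List (List String)) (out : List (List String)) : Decidable (Spec_decrypt_texts cases out) := by unfold Spec_decrypt_texts; infer_instance

-- ===== CLAIM (what is proved, stated in full; the proofs are below) =====
def Claim_equal_decrypt_texts : Prop := ∀ (cases : List (List String)), Dom_decrypt_texts cases → Spec_decrypt_texts cases (decrypt_texts cases)

-- ===== LEMMAS AND PROOFS =====

-- ---- generalities about pair lists ----

-- a pair list is "consistent" when it is the graph of a partial bijection
def pvOk (L : List (Char × Char)) : Prop :=
  ∀ a ∈ L, ∀ b ∈ L, (a.1 = b.1 ↔ a.2 = b.2)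

def pvFstMap (L : List (Char × Char)) (c : Char) : Option Char :=
  (L.find? (fun pr => pr.1 == c)).map (·.2)

def pvSndMap (L : List (Char × Char)) (p : Char) : Option Char :=
  (L.find? (fun pr => pr.2 == p)).map (·.1)

theorem pvOk_of_subset {L1 L2 : List (Char × Char)} (h : ∀ x ∈ L1, x ∈ L2) (h2 : pvOk L2) :
    pvOk L1 := fun a ha b hb => h2 a (h a ha) b (h b hb)

theorem pvFstMap_append (L1 L2 : List (Char × Char)) (c : Char) :
    pvFstMap (L1 ++ L2) c = (pvFstMap L1 c).or (pvFstMap L2 c) := by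
  simp [pvFstMap, List.find?_append, Option.map_or]

theorem pvSndMap_append (L1 L2 : List (Char × Char)) (p : Char) :
    pvSndMap (L1 ++ L2) p = (pvSndMap L1 p).or (pvSndMap L2 p) := by
  simp [pvSndMap, List.find?_append, Option.map_or]

theorem pvFstMap_mem {L : List (Char × Char)} {c p : Char} (h : pvFstMap L c = some p) :
    (c, p) ∈ L := by
  unfold pvFstMap at h
  rcases hm : L.find? (fun pr => pr.1 == c) with _ | pr
  · rw [hm] at h; simp at h
  · rw [hm] at h
    have hmem := List.mem_of_find?_eq_some hm
    have hc : pr.1 = c := by simpa using List.find?_some hm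
    simp only [Option.map_some, Option.some.injEq] at h
    have : pr = (c, p) := by cases pr; simp_all
    rwa [this] at hmem

theorem pvSndMap_mem {L : List (Char × Char)} {c p : Char} (h : pvSndMap L p = some c) :
    (c, p) ∈ L := by
  unfold pvSndMap at h
  rcases hm : L.find? (fun pr => pr.2 == p) with _ | pr
  · rw [hm] at h; simp at h
  · rw [hm] at h
    have hmem := List.mem_of_find?_eq_some hm
    have hc : pr.2 = p := by simpa using List.find?_some hm
    simp only [Option.map_some, Option.some.injEq] at h
    have : pr = (c, p) := by cases pr; simp_all
    rwa [this] at hmem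

theorem pvFstMap_isSome_of_mem {L : List (Char × Char)} {c p : Char} (h : (c, p) ∈ L) :
    (pvFstMap L c).isSome := by
  unfold pvFstMap
  rw [Option.isSome_map, List.find?_isSome]
  exact ⟨(c, p), h, by simp⟩

theorem pvSndMap_isSome_of_mem {L : List (Char × Char)} {c p : Char} (h : (c, p) ∈ L) :
    (pvSndMap L p).isSome := by
  unfold pvSndMap
  rw [Option.isSome_map, List.find?_isSome]
  exact ⟨(c, p), h, by simp⟩

theorem pvFstMap_eq_some_iff {L : List (Char × Char)} (h : pvOk L) {c p : Char} :
    pvFstMap L c = some p ↔ (c, p) ∈ L := by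
  constructor
  · exact pvFstMap_mem
  · intro hmem
    have hs := pvFstMap_isSome_of_mem hmem
    unfold pvFstMap at hs ⊢
    rcases hm : L.find? (fun pr => pr.1 == c) with _ | pr
    · rw [hm] at hs; simp at hs
    · have hmem' := List.mem_of_find?_eq_some hm
      have hc : pr.1 = c := by simpa using List.find?_some hm
      have h2 := (h pr hmem' (c, p) hmem).mp (by simpa using hc)
      rw [hm]
      simp [h2]

theorem pvOk_snoc {L : List (Char × Char)} {x : Char × Char} (hok : pvOk L)
    (hx : ∀ b ∈ L, (x.1 = b.1 ↔ x.2 = b.2)) : pvOk (L ++ [x]) := by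
  intro a ha b hb
  rcases List.mem_append.1 ha with ha' | ha' <;> rcases List.mem_append.1 hb with hb' | hb'
  · exact hok a ha' b hb'
  · have : b = x := by simpa using hb'
    subst this
    exact ⟨fun h => (hx a ha').mp h.symm |>.symm, fun h => ((hx a ha').mpr h.symm).symm⟩
  · have : a = x := by simpa using ha'
    subst this
    exact hx b hb'
  · have h1 : a = x := by simpa using ha'
    have h2 : b = x := by simpa using hb'
    subst h1; subst h2
    exact ⟨fun _ => rfl, fun _ => rfl⟩

theorem pvMemZip {α : Type} {cs ps : List α} {pr : α × α} :
    pr ∈ cs.zip ps ↔ ∃ i, ∃ h1 : i < cs.length, ∃ h2 : i < ps.length, pr = (cs[i], ps[i]) := by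
  rw [List.mem_iff_getElem]
  constructor
  · rintro ⟨i, hi, h⟩
    have hl := hi; rw [List.length_zip] at hl
    exact ⟨i, by omega, by omega, by rw [← h, List.getElem_zip]⟩
  · rintro ⟨i, h1, h2, h⟩
    exact ⟨i, by rw [List.length_zip]; omega, by rw [List.getElem_zip, ← h]⟩

theorem pvIdxOf_le {l : List Char} {k : Nat} {a : Char} (hk : k < l.length) (h : l[k] = a) :
    l.idxOf a ≤ k := by
  by_contra hlt
  have hlt' : k < List.idxOf a l := by omega
  have h2 := List.not_of_lt_findIdx (p := (· == a)) (xs := l) (i := k) hlt'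
  simp at h2
  exact h2 h

-- ---- A's incremental bidirectional dict check = pvOk ----

def pvInv (dec enc : PySem.Dict Char Char) (seen : List (Char × Char)) : Prop :=
  (∀ c, dec.get? c = pvFstMap seen c) ∧ (∀ p, enc.get? p = pvSndMap seen p)

theorem pvCharLoop_spec : ∀ (L seen : List (Char × Char)) (dec enc : PySem.Dict Char Char),
    pvInv dec enc seen → pvOk seen →
    ((pvOk (seen ++ L) → ∃ dec' enc', pvAcharLoop L dec enc = (dec', enc', true) ∧
        pvInv dec' enc' (seen ++ L)) ∧
     (¬ pvOk (seen ++ L) → (pvAcharLoop L dec enc).2.2 = false)) := by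
  intro L
  induction L with
  | nil =>
    intro seen dec enc hinv hok
    constructor
    · intro _; exact ⟨dec, enc, by simp [pvAcharLoop], by simpa using hinv⟩
    · intro h; exact absurd (by simpa using hok) h
  | cons hd tl ih =>
    intro seen dec enc hinv hok
    obtain ⟨c, p⟩ := hd
    have hseen : seen ++ (c, p) :: tl = (seen ++ [(c, p)]) ++ tl := by simp
    by_cases hc : dec.contains c
    · -- c already mapped
      have hsome : (pvFstMap seen c).isSome := by
        rw [← hinv.1 c, ← PySem.Dict.contains_eq_isSome_get?]; exact hc
      rcases hp0 : pvFstMap seen c with _ | p0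
      · rw [hp0] at hsome; simp at hsome
      have hmem0 : (c, p0) ∈ seen := pvFstMap_mem hp0
      have hgd : dec.getD c ' ' = p0 := by
        rw [PySem.Dict.getD_eq_get?_getD, hinv.1 c, hp0]; rfl
      by_cases hpp : p0 = p
      · -- consistent pair seen again: loop continues, `seen` gains a duplicate
        subst hpp
        have hok' : pvOk (seen ++ [(c, p0)]) := by
          apply pvOk_snoc hok
          intro b hb
          exact hok (c, p0) hmem0 b hb
        have hinv' : pvInv dec enc (seen ++ [(c, p0)]) := by
          constructor
          · intro c'
            rw [pvFstMap_append, hinv.1 c']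
            rcases hf : pvFstMap seen c' with _ | q
            · by_cases hcc : c' = c
              · subst hcc
                rw [hf] at hp0; simp at hp0
              · simp [pvFstMap, List.find?, show (c == c') = false by simpa using fun h => hcc h.symm]
            · simp
          · intro p'
            rw [pvSndMap_append, hinv.2 p']
            rcases hf : pvSndMap seen p' with _ | q
            · by_cases hpc : p' = p0
              · subst hpc
                have : (pvSndMap seen p').isSome := pvSndMap_isSome_of_mem hmem0
                rw [hf] at this; simp at this
              · simp [pvSndMap, List.find?, show (p0 == p') = false by simpa using fun h => hpc h.symm]
            · simp
        have hrec := ih (seen ++ [(c, p0)]) dec enc hinv' hok'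
        rw [show pvAcharLoop ((c, p0) :: tl) dec enc = pvAcharLoop tl dec enc from by
          simp [pvAcharLoop, hc, hgd]]
        rw [hseen]
        exact hrec
      · -- inconsistent pair: the loop fails, and pvOk fails
        have hfail : ¬ pvOk (seen ++ (c, p) :: tl) := by
          intro hok2
          have h1 : (c, p0) ∈ seen ++ (c, p) :: tl := by simp [hmem0]
          have h2 : (c, p) ∈ seen ++ (c, p) :: tl := by simp
          exact hpp ((hok2 (c, p0) h1 (c, p) h2).mp rfl)
        constructor
        · intro h; exact absurd h hfail
        · intro _
          simp [pvAcharLoop, hc, hgd, hpp]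
    · by_cases hp : enc.contains p
      · -- p already has a (necessarily different) preimage: the loop fails
        have hsome : (pvSndMap seen p).isSome := by
          rw [← hinv.2 p, ← PySem.Dict.contains_eq_isSome_get?]; exact hp
        rcases hc0 : pvSndMap seen p with _ | c0
        · rw [hc0] at hsome; simp at hsome
        have hmem0 : (c0, p) ∈ seen := pvSndMap_mem hc0
        have hgd : enc.getD p ' ' = c0 := by
          rw [PySem.Dict.getD_eq_get?_getD, hinv.2 p, hc0]; rfl
        have hne : c0 ≠ c := by
          rintro rfl
          have : (pvFstMap seen c0).isSome := pvFstMap_isSome_of_mem hmem0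
          rw [← hinv.1 c0, ← PySem.Dict.contains_eq_isSome_get?] at this
          exact absurd this (by simpa using hc)
        have hfail : ¬ pvOk (seen ++ (c, p) :: tl) := by
          intro hok2
          have h1 : (c0, p) ∈ seen ++ (c, p) :: tl := by simp [hmem0]
          have h2 : (c, p) ∈ seen ++ (c, p) :: tl := by simp
          exact hne ((hok2 (c0, p) h1 (c, p) h2).mpr rfl)
        constructor
        · intro h; exact absurd h hfail
        · intro _
          simp [pvAcharLoop, hc, hp, hgd, hne]
      · -- fresh pair: insert into both dicts
        have hcn : dec.get? c = none := by
          rw [PySem.Dict.contains_eq_isSome_get?] at hc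
          simpa using hc
        have hpn : enc.get? p = none := by
          rw [PySem.Dict.contains_eq_isSome_get?] at hp
          simpa using hp
        have hfs : pvFstMap seen c = none := by rw [← hinv.1 c]; exact hcn
        have hsn : pvSndMap seen p = none := by rw [← hinv.2 p]; exact hpn
        have hnotmem : ∀ b ∈ seen, c ≠ b.1 ∧ p ≠ b.2 := by
          intro b hb
          constructor
          · rintro rfl
            have : (pvFstMap seen b.1).isSome := pvFstMap_isSome_of_mem (by simpa using hb)
            rw [hfs] at this; simp at this
          · rintro rfl
            have : (pvSndMap seen b.2).isSome := pvSndMap_isSome_of_mem (by simpa using hb)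
            rw [hsn] at this; simp at this
        have hok' : pvOk (seen ++ [(c, p)]) := by
          apply pvOk_snoc hok
          intro b hb
          obtain ⟨h1, h2⟩ := hnotmem b hb
          exact iff_of_false h1 h2
        have hinv' : pvInv (dec.insert c p) (enc.insert p c) (seen ++ [(c, p)]) := by
          constructor
          · intro c'
            rw [pvFstMap_append, PySem.Dict.get?_insert, hinv.1 c']
            by_cases hcc : c' = c
            · subst hcc
              rw [hfs]
              simp [pvFstMap, List.find?]
            · rw [if_neg hcc]
              rcases hf : pvFstMap seen c' with _ | q
              · simp [pvFstMap, List.find?, show (c == c') = false by simpa using fun h => hcc h.symm]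
              · simp
          · intro p'
            rw [pvSndMap_append, PySem.Dict.get?_insert, hinv.2 p']
            by_cases hpc : p' = p
            · subst hpc
              rw [hsn]
              simp [pvSndMap, List.find?]
            · rw [if_neg hpc]
              rcases hf : pvSndMap seen p' with _ | q
              · simp [pvSndMap, List.find?, show (p == p') = false by simpa using fun h => hpc h.symm]
              · simp
        have hrec := ih (seen ++ [(c, p)]) (dec.insert c p) (enc.insert p c) hinv' hok'
        rw [show pvAcharLoop ((c, p) :: tl) dec enc = pvAcharLoop tl (dec.insert c p) (enc.insert p c) from by
          simp [pvAcharLoop, hc, hp]]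
        rw [hseen]
        exact hrec

theorem pvCharLoop_ok_iff (L : List (Char × Char)) :
    (pvAcharLoop L PySem.Dict.empty PySem.Dict.empty).2.2 = true ↔ pvOk L := by
  have hinv : pvInv PySem.Dict.empty PySem.Dict.empty [] :=
    ⟨fun c => by simp [pvFstMap], fun p => by simp [pvSndMap]⟩
  have h := pvCharLoop_spec L [] PySem.Dict.empty PySem.Dict.empty hinv (by intro a ha; simp at ha)
  constructor
  · intro hok
    by_contra hn
    have := h.2 (by simpa using hn)
    rw [hok] at this; simp at this
  · intro hok
    obtain ⟨dec', enc', heq, _⟩ := h.1 (by simpa using hok)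
    rw [heq]

theorem pvCharLoop_dict (L : List (Char × Char)) (hok : pvOk L) :
    ∃ dec' enc', pvAcharLoop L PySem.Dict.empty PySem.Dict.empty = (dec', enc', true) ∧
      ∀ c, dec'.get? c = pvFstMap L c := by
  have hinv : pvInv PySem.Dict.empty PySem.Dict.empty [] :=
    ⟨fun c => by simp [pvFstMap], fun p => by simp [pvSndMap]⟩
  have h := pvCharLoop_spec L [] PySem.Dict.empty PySem.Dict.empty hinv (by intro a ha; simp at ha)
  obtain ⟨dec', enc', heq, hinv'⟩ := h.1 (by simpa using hok)
  exact ⟨dec', enc', heq, by simpa using hinv'.1⟩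

theorem pvCharLoop_append (l1 l2 : List (Char × Char)) (dec enc : PySem.Dict Char Char) :
    pvAcharLoop (l1 ++ l2) dec enc =
      (match pvAcharLoop l1 dec enc with
        | (d, e, true) => pvAcharLoop l2 d e
        | (d, e, false) => (d, e, false)) := by
  induction l1 generalizing dec enc with
  | nil => simp [pvAcharLoop]
  | cons hd tl ih =>
    obtain ⟨c, p⟩ := hd
    simp only [List.cons_append, pvAcharLoop]
    split_ifs <;> simp [ih]

theorem pvWordLoop_eq_charLoop : ∀ (wps : List (String × String)) (dec enc : PySem.Dict Char Char),
    (∀ pr ∈ wps, pr.1.toList.length = pr.2.toList.length) →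
    pvAwordLoop wps dec enc =
      pvAcharLoop (wps.flatMap (fun pr => pr.1.toList.zip pr.2.toList)) dec enc := by
  intro wps
  induction wps with
  | nil => intro dec enc _; simp [pvAwordLoop, pvAcharLoop]
  | cons hd tl ih =>
    intro dec enc h
    obtain ⟨cw, pw⟩ := hd
    have hlen : cw.toList.length = pw.toList.length := h (cw, pw) (by simp)
    simp only [pvAwordLoop, PySem.Str.len_eq]
    rw [if_neg (by simpa using hlen)]
    rw [List.flatMap_cons, pvCharLoop_append]
    rcases hr : pvAcharLoop (cw.toList.zip pw.toList) dec enc with ⟨d, e, ok⟩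
    cases ok
    · simp
    · simp [ih d e (fun pr hpr => h pr (List.mem_cons_of_mem _ hpr))]

-- ---- A's word-count and word-length checks = equality of length profiles ----

theorem pvLenLoop_iff : ∀ (ws ps : List String),
    (ws.length = ps.length ∧ pvAlenLoop (ws.zip (ps.map PySem.Str.len)) = true) ↔
      ws.map (fun w => w.toList.length) = ps.map (fun w => w.toList.length) := by
  intro ws
  induction ws with
  | nil =>
    intro ps
    cases ps with
    | nil => simp [pvAlenLoop]
    | cons p tps => simp
  | cons w tl ih =>
    intro ps
    cases ps with
    | nil => simp
    | cons p tps =>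
      simp only [List.map_cons, List.zip_cons_cons, pvAlenLoop, List.length_cons]
      constructor
      · rintro ⟨h1, h2⟩
        split_ifs at h2 with hlen
        have : w.toList.length = p.toList.length := by
          simp only [PySem.Str.len_eq] at hlen; omega
        rw [this]
        simp only [List.cons.injEq, true_and]
        exact (ih tps).mp ⟨by omega, h2⟩
      · intro h
        simp only [List.cons.injEq] at h
        obtain ⟨h1, h2⟩ := h
        have := (ih tps).mpr h2
        refine ⟨by omega, ?_⟩
        have hne : ¬ (PySem.Str.len w ≠ PySem.Str.len p) := by
          simp only [PySem.Str.len_eq, ne_eq, not_not]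
          exact_mod_cast h1
        rw [if_neg hne]
        exact this.2

-- ---- B's signature function, closed form ----

def pvSigSpec (cs : List Char) : List Int :=
  cs.map (fun ch => if ch = ' ' then (-1 : Int) else ((cs.idxOf ch : Nat) : Int))

theorem pvBsignature_spec : ∀ (rest pre : List Char) (first : PySem.Dict Char Int),
    (∀ ch, first.get? ch = if ch ∈ pre ∧ ch ≠ ' ' then some ((pre.idxOf ch : Nat) : Int) else none) →
    pvBsignature rest first (pre.length : Int) =
      rest.map (fun ch => if ch = ' ' then (-1 : Int) else (((pre ++ rest).idxOf ch : Nat) : Int)) := by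
  intro rest
  induction rest with
  | nil => intro pre first _; simp [pvBsignature]
  | cons ch rest' ih =>
    intro pre first hinv
    rw [List.map_cons]
    by_cases hsp : ch = ' '
    · subst hsp
      rw [show pvBsignature (' ' :: rest') first (pre.length : Int) =
          (-1) :: pvBsignature rest' first ((pre.length : Int) + 1) from by
        simp [pvBsignature]]
      rw [if_pos rfl]
      congr 1
      have h1 : ((pre.length : Int) + 1) = (((pre ++ [' ']).length : Nat) : Int) := by simp
      rw [h1, ih (pre ++ [' ']) first ?_]
      · apply List.map_congr_left
        intro c _
        by_cases hc : c = ' ' <;> simp [hc, List.append_assoc]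
      · intro c
        rw [hinv c]
        by_cases hc : c = ' '
        · simp [hc]
        · by_cases hm : c ∈ pre
          · rw [if_pos ⟨hm, hc⟩, if_pos ⟨by simp [hm], hc⟩, List.idxOf_append_of_mem hm]
          · rw [if_neg (by tauto), if_neg ?_]
            rintro ⟨hmem, _⟩
            rcases List.mem_append.1 hmem with h | h
            · exact hm h
            · exact hc (by simpa using h)
    · rw [show pvBsignature (ch :: rest') first (pre.length : Int) =
          first.getD ch (pre.length : Int) ::
            pvBsignature rest' (first.setdefault ch (pre.length : Int)) ((pre.length : Int) + 1) from by
        simp [pvBsignature, hsp]]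
      rw [if_neg hsp]
      congr 1
      · rw [PySem.Dict.getD_eq_get?_getD, hinv ch]
        by_cases hm : ch ∈ pre
        · rw [if_pos ⟨hm, hsp⟩, List.idxOf_append_of_mem hm]; simp
        · rw [if_neg (by tauto), List.idxOf_append_of_notMem hm]
          simp [List.idxOf_cons_self]
      · have h1 : ((pre.length : Int) + 1) = (((pre ++ [ch]).length : Nat) : Int) := by simp
        rw [h1, ih (pre ++ [ch]) (first.setdefault ch (pre.length : Int)) ?_]
        · apply List.map_congr_left
          intro c _
          by_cases hc : c = ' ' <;> simp [hc, List.append_assoc]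
        · intro c
          by_cases hceq : c = ch
          · subst hceq
            rw [PySem.Dict.get?_setdefault_self, hinv c]
            by_cases hm : c ∈ pre
            · rw [if_pos ⟨hm, hsp⟩]
              rw [if_pos ⟨(by simp : c ∈ pre ++ [c]), hsp⟩]
              rw [List.idxOf_append_of_mem hm]; simp
            · rw [if_neg (by tauto)]
              rw [if_pos ⟨(by simp : c ∈ pre ++ [c]), hsp⟩]
              rw [List.idxOf_append_of_notMem hm]
              simp [List.idxOf_cons_self]
          · rw [PySem.Dict.get?_setdefault_of_ne (hne := hceq), hinv c]
            by_cases hm : c ∈ pre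
            · have hm' : c ∈ pre ++ [ch] := by simp [hm]
              by_cases hc : c = ' '
              · rw [if_neg (by tauto), if_neg (by tauto)]
              · rw [if_pos ⟨hm, hc⟩, if_pos ⟨hm', hc⟩, List.idxOf_append_of_mem hm]
            · have hm' : c ∉ pre ++ [ch] := by
                simp only [List.mem_append, List.mem_singleton]
                rintro (h | h)
                · exact hm h
                · exact hceq h
              rw [if_neg (by tauto), if_neg (by tauto)]

theorem pvBsig_eq_spec (cs : List Char) : pvBsig cs = pvSigSpec cs := by
  unfold pvBsig pvSigSpec
  have := pvBsignature_spec cs [] PySem.Dict.empty (by simp)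
  simpa using this

-- ---- signature equality = aligned spaces + consistent pair list ----

theorem pvSigSpec_getElem (cs : List Char) (i : Nat) (h : i < cs.length) :
    (pvSigSpec cs)[i]'(by simpa [pvSigSpec] using h) =
      if cs[i] = ' ' then (-1 : Int) else ((cs.idxOf cs[i] : Nat) : Int) := by
  simp [pvSigSpec]

theorem pvSigSpec_eq_iff (cs ps : List Char) :
    pvSigSpec cs = pvSigSpec ps ↔
      (cs.length = ps.length ∧ (∀ pr ∈ cs.zip ps, (pr.1 = ' ' ↔ pr.2 = ' ')) ∧
        pvOk (cs.zip ps)) := by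
  constructor
  · intro h
    have hl : cs.length = ps.length := by
      have := congrArg List.length h; simpa [pvSigSpec] using this
    have hpt : ∀ i (h1 : i < cs.length) (h2 : i < ps.length),
        (if cs[i] = ' ' then (-1 : Int) else ((cs.idxOf cs[i] : Nat) : Int)) =
        (if ps[i] = ' ' then (-1 : Int) else ((ps.idxOf ps[i] : Nat) : Int)) := by
      intro i h1 h2
      rw [← pvSigSpec_getElem cs i h1, ← pvSigSpec_getElem ps i h2]
      congr 1
    have halign : ∀ i (h1 : i < cs.length) (h2 : i < ps.length), (cs[i] = ' ' ↔ ps[i] = ' ') := by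
      intro i h1 h2
      have := hpt i h1 h2
      constructor
      · intro hc
        by_contra hp
        rw [if_pos hc, if_neg hp] at this
        omega
      · intro hp
        by_contra hc
        rw [if_neg hc, if_pos hp] at this
        omega
    refine ⟨hl, ?_, ?_⟩
    · intro pr hpr
      obtain ⟨i, h1, h2, rfl⟩ := pvMemZip.1 hpr
      exact halign i h1 h2
    · have key : ∀ i j (hi1 : i < cs.length) (hi2 : i < ps.length)
          (hj1 : j < cs.length) (hj2 : j < ps.length), cs[i] = cs[j] → ps[i] = ps[j] := by
        intro i j hi1 hi2 hj1 hj2 hcc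
        by_cases hsp : cs[i] = ' '
        · have : ps[i] = ' ' := (halign i hi1 hi2).1 hsp
          have h2 : ps[j] = ' ' := (halign j hj1 hj2).1 (hcc ▸ hsp)
          rw [this, h2]
        · have hpi : ¬ ps[i] = ' ' := fun hp => hsp ((halign i hi1 hi2).2 hp)
          have hpj : ¬ ps[j] = ' ' := fun hp => (hsp <| hcc.symm ▸ (halign j hj1 hj2).2 hp)
          have e1 := hpt i hi1 hi2
          have e2 := hpt j hj1 hj2
          rw [if_neg hsp, if_neg hpi] at e1
          rw [if_neg (hcc ▸ hsp), if_neg hpj] at e2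
          have hidx : ps.idxOf ps[i] = ps.idxOf ps[j] := by
            have : cs.idxOf cs[i] = cs.idxOf cs[j] := by rw [hcc]
            omega
          have hki : ps.idxOf ps[i] < ps.length :=
            List.idxOf_lt_length_of_mem (List.getElem_mem hi2)
          have hkj : ps.idxOf ps[j] < ps.length :=
            List.idxOf_lt_length_of_mem (List.getElem_mem hj2)
          have g1 : ps[ps.idxOf ps[i]]'hki = ps[i] := List.getElem_idxOf hki
          have g2 : ps[ps.idxOf ps[j]]'hkj = ps[j] := List.getElem_idxOf hkj
          rw [← g1, ← g2]
          simp only [hidx]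
      intro a ha b hb
      obtain ⟨i, hi1, hi2, rfl⟩ := pvMemZip.1 ha
      obtain ⟨j, hj1, hj2, rfl⟩ := pvMemZip.1 hb
      constructor
      · exact key i j hi1 hi2 hj1 hj2
      · intro hpp
        have key2 : ∀ i j (hi1 : i < ps.length) (hi2 : i < cs.length)
            (hj1 : j < ps.length) (hj2 : j < cs.length), ps[i] = ps[j] → cs[i] = cs[j] := by
          intro i j hi1 hi2 hj1 hj2 hcc
          by_cases hsp : ps[i] = ' '
          · have : cs[i] = ' ' := (halign i hi2 hi1).2 hsp
            have h2 : cs[j] = ' ' := (halign j hj2 hj1).2 (hcc ▸ hsp)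
            rw [this, h2]
          · have hpi : ¬ cs[i] = ' ' := fun hp => hsp ((halign i hi2 hi1).1 hp)
            have hpj : ¬ cs[j] = ' ' := fun hp => (hsp <| hcc.symm ▸ (halign j hj2 hj1).1 hp)
            have e1 := hpt i hi2 hi1
            have e2 := hpt j hj2 hj1
            rw [if_neg hpi, if_neg hsp] at e1
            rw [if_neg hpj, if_neg (hcc ▸ hsp)] at e2
            have hidx : cs.idxOf cs[i] = cs.idxOf cs[j] := by
              have : ps.idxOf ps[i] = ps.idxOf ps[j] := by rw [hcc]
              omega
            have hki : cs.idxOf cs[i] < cs.length :=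
              List.idxOf_lt_length_of_mem (List.getElem_mem hi2)
            have hkj : cs.idxOf cs[j] < cs.length :=
              List.idxOf_lt_length_of_mem (List.getElem_mem hj2)
            have g1 : cs[cs.idxOf cs[i]]'hki = cs[i] := List.getElem_idxOf hki
            have g2 : cs[cs.idxOf cs[j]]'hkj = cs[j] := List.getElem_idxOf hkj
            rw [← g1, ← g2]
            simp only [hidx]
        exact key2 i j hi2 hi1 hj2 hj1 hpp
  · rintro ⟨hl, halign, hok⟩
    apply List.ext_getElem (by simpa [pvSigSpec] using hl)
    intro i h1 h2
    simp only [pvSigSpec, List.length_map] at h1 h2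
    rw [pvSigSpec_getElem cs i h1, pvSigSpec_getElem ps i h2]
    have hmem : (cs[i], ps[i]) ∈ cs.zip ps := pvMemZip.2 ⟨i, h1, h2, rfl⟩
    by_cases hsp : cs[i] = ' '
    · rw [if_pos hsp, if_pos ((halign _ hmem).1 hsp)]
    · have hps : ¬ ps[i] = ' ' := fun hp => hsp ((halign _ hmem).2 hp)
      rw [if_neg hsp, if_neg hps]
      have hkc : cs.idxOf cs[i] < cs.length := List.idxOf_lt_length_of_mem (List.getElem_mem h1)
      have hkp : ps.idxOf ps[i] < ps.length := List.idxOf_lt_length_of_mem (List.getElem_mem h2)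
      have m1 : (cs[cs.idxOf cs[i]]'hkc, ps[cs.idxOf cs[i]]'(by omega)) ∈ cs.zip ps :=
        pvMemZip.2 ⟨_, hkc, by omega, rfl⟩
      have m2 : (cs[ps.idxOf ps[i]]'(by omega), ps[ps.idxOf ps[i]]'hkp) ∈ cs.zip ps :=
        pvMemZip.2 ⟨_, by omega, hkp, rfl⟩
      have le1 : ps.idxOf ps[i] ≤ cs.idxOf cs[i] := by
        apply pvIdxOf_le (by omega)
        exact (hok _ m1 _ hmem).1 (by simp [List.getElem_idxOf hkc])
      have le2 : cs.idxOf cs[i] ≤ ps.idxOf ps[i] := by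
        apply pvIdxOf_le (by omega)
        exact (hok _ m2 _ hmem).2 (by simp [List.getElem_idxOf hkp])
      omega

-- ---- B's dict(zip(joined, plain)) lookups ----

theorem pvFoldlInsert_get? : ∀ (L : List (Char × Char)) (d : PySem.Dict Char Char) (c : Char),
    (L.foldl (fun d pr => d.insert pr.1 pr.2) d).get? c =
      (match L.reverse.find? (fun pr => pr.1 == c) with
        | some pr => some pr.2
        | none => d.get? c) := by
  intro L
  induction L with
  | nil => intro d c; simp
  | cons hd tl ih =>
    intro d c
    simp only [List.foldl_cons, List.reverse_cons, List.find?_append]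
    rw [ih]
    rcases hm : tl.reverse.find? (fun pr => pr.1 == c) with _ | pr
    · rw [hm]
      simp only [Option.none_or]
      rw [PySem.Dict.get?_insert]
      by_cases hc : hd.1 = c
      · simp [List.find?, hc]
      · have hc' : c ≠ hd.1 := fun h => hc h.symm
        have hb : (hd.1 == c) = false := by simpa using hc
        simp [List.find?, hb, hc']
    · rw [hm]; simp

theorem pvBdict_get? {L : List (Char × Char)} (h : pvOk L) (c : Char) :
    (L.foldl (fun d pr => d.insert pr.1 pr.2) PySem.Dict.empty).get? c = pvFstMap L c := by
  rw [pvFoldlInsert_get?]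
  rcases hm : L.reverse.find? (fun pr => pr.1 == c) with _ | pr
  · rw [hm]
    rcases hf : pvFstMap L c with _ | p
    · simp
    · exfalso
      have hmem := pvFstMap_mem hf
      have hs : (pvFstMap L.reverse c).isSome := pvFstMap_isSome_of_mem (by rwa [List.mem_reverse])
      rw [pvFstMap, hm] at hs; simp at hs
  · rw [hm]
    have hfr : pvFstMap L.reverse c = some pr.2 := by rw [pvFstMap, hm]; rfl
    have hmem : (c, pr.2) ∈ L := by
      have := pvFstMap_mem hfr
      rwa [List.mem_reverse] at this
    exact ((pvFstMap_eq_some_iff h).2 hmem).symm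

-- ---- split₀ produces nonempty, whitespace-free words ----

theorem pvSplitGo : ∀ (s cur : List Char) (acc : List (List Char)),
    (∀ c ∈ cur, PySem.Chars.isspace c = false) →
    (∀ w ∈ acc, w ≠ [] ∧ ∀ c ∈ w, PySem.Chars.isspace c = false) →
    ∀ w ∈ PySem.Chars.split₀.go s cur acc,
      w ≠ [] ∧ ∀ c ∈ w, PySem.Chars.isspace c = false := by
  intro s
  induction s with
  | nil =>
    intro cur acc hcur hacc w hw
    simp only [PySem.Chars.split₀.go] at hw
    split_ifs at hw with hemp
    · exact hacc w (by simpa using hw)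
    · rw [List.mem_reverse] at hw
      rcases List.mem_cons.1 hw with h | h
      · subst h
        refine ⟨by simpa using hemp, fun c hc => hcur c (by simpa using hc)⟩
      · exact hacc w h
  | cons c rest ih =>
    intro cur acc hcur hacc w hw
    simp only [PySem.Chars.split₀.go] at hw
    split_ifs at hw with hsp hemp
    · exact ih [] acc (by simp) hacc w hw
    · refine ih [] (cur.reverse :: acc) (by simp) ?_ w hw
      intro w' hw'
      rcases List.mem_cons.1 hw' with h | h
      · subst h
        exact ⟨by simpa using hemp, fun c hc => hcur c (by simpa using hc)⟩
      · exact hacc w' h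
    · refine ih (c :: cur) acc ?_ hacc w hw
      intro c' hc'
      rcases List.mem_cons.1 hc' with h | h
      · subst h; simpa using hsp
      · exact hcur c' h

theorem pvSplitWords : ∀ (s : List Char), ∀ w ∈ PySem.Chars.split₀ s,
    w ≠ [] ∧ ∀ c ∈ w, PySem.Chars.isspace c = false := by
  intro s
  exact pvSplitGo s [] [] (by simp) (by simp)

-- ---- structure of the zip of two single-space joins ----

theorem pvZipJoin : ∀ (ws vs : List (List Char)), ws.map List.length = vs.map List.length →
    (List.intercalate [' '] ws).zip (List.intercalate [' '] vs) =
      List.intercalate [(' ', ' ')] ((ws.zip vs).map (fun q => q.1.zip q.2)) := by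
  intro ws
  induction ws with
  | nil =>
    intro vs h
    have : vs = [] := by cases vs <;> simp_all
    subst this; simp [List.intercalate]
  | cons w tl ih =>
    intro vs h
    cases vs with
    | nil => simp at h
    | cons v tvs =>
      simp only [List.map_cons, List.cons.injEq] at h
      obtain ⟨hlen, htl⟩ := h
      cases tl with
      | nil =>
        have : tvs = [] := by cases tvs <;> simp_all
        subst this
        simp [List.intercalate]
      | cons w2 tl2 =>
        cases tvs with
        | nil => simp at htl
        | cons v2 tvs2 =>
          rw [show List.intercalate [' '] (w :: w2 :: tl2) = w ++ (' ' :: List.intercalate [' '] (w2 :: tl2)) from by simp [List.intercalate]]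
          rw [show List.intercalate [' '] (v :: v2 :: tvs2) = v ++ (' ' :: List.intercalate [' '] (v2 :: tvs2)) from by simp [List.intercalate]]
          rw [show ((w :: w2 :: tl2).zip (v :: v2 :: tvs2)).map (fun q : List Char × List Char => q.1.zip q.2) = w.zip v :: ((w2 :: tl2).zip (v2 :: tvs2)).map (fun q => q.1.zip q.2) from by simp]
          rw [show List.intercalate [(' ', ' ')] (w.zip v :: ((w2 :: tl2).zip (v2 :: tvs2)).map (fun q : List Char × List Char => q.1.zip q.2)) = w.zip v ++ ((' ', ' ') :: List.intercalate [(' ', ' ')] (((w2 :: tl2).zip (v2 :: tvs2)).map (fun q => q.1.zip q.2))) from by simp [List.intercalate]]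
          rw [List.zip_append hlen]
          rw [List.zip_cons_cons]
          rw [ih (v2 :: tvs2) htl]

theorem pvMemIntercalate {α : Type} (x : α) : ∀ (ls : List (List α)) (pr : α),
    pr ∈ List.intercalate [x] ls ↔ ((∃ l ∈ ls, pr ∈ l) ∨ (pr = x ∧ 2 ≤ ls.length)) := by
  intro ls
  induction ls with
  | nil => intro pr; simp [List.intercalate]
  | cons w tl ih =>
    intro pr
    cases tl with
    | nil => simp [List.intercalate]
    | cons w2 tl2 =>
      rw [show List.intercalate [x] (w :: w2 :: tl2) = w ++ (x :: List.intercalate [x] (w2 :: tl2)) from by simp [List.intercalate]]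
      simp only [List.mem_append, List.mem_cons, ih pr, List.length_cons]
      constructor
      · rintro (h | h | (⟨l, hl, hpr⟩ | ⟨rfl, h2⟩))
        · exact Or.inl ⟨w, by simp, h⟩
        · exact Or.inr ⟨h, by omega⟩
        · exact Or.inl ⟨l, by simp [hl], hpr⟩
        · exact Or.inr ⟨rfl, by omega⟩
      · rintro (⟨l, hl, hpr⟩ | ⟨rfl, _⟩)
        · rcases hl with rfl | hl'
          · exact Or.inl hpr
          · exact Or.inr (Or.inr (Or.inl ⟨l, by simpa using hl', hpr⟩))
        · exact Or.inr (Or.inl rfl)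

-- ---- space profiles and injectivity of the length-profile encoding ----

def pvProf (cs : List Char) : List Bool := cs.map (fun c => decide (c = ' '))

def pvG (lens : List Nat) : List Bool :=
  List.intercalate [true] (lens.map (fun n => List.replicate n false))

theorem pvProf_join : ∀ (ws : List (List Char)),
    pvProf (List.intercalate [' '] ws) = List.intercalate [true] (ws.map pvProf) := by
  intro ws
  induction ws with
  | nil => simp [pvProf, List.intercalate]
  | cons w tl ih =>
    cases tl with
    | nil => simp [List.intercalate]
    | cons w2 tl2 =>
      rw [show List.intercalate [' '] (w :: w2 :: tl2) = w ++ (' ' :: List.intercalate [' '] (w2 :: tl2)) from by simp [List.intercalate]]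
      rw [show List.intercalate [true] ((w :: w2 :: tl2).map pvProf) = pvProf w ++ (true :: List.intercalate [true] ((w2 :: tl2).map pvProf)) from by simp [List.intercalate, List.map_cons]]
      rw [← ih]
      simp [pvProf]

def pvDecGo : Nat → List Bool → List Nat
  | k, [] => [k]
  | k, false :: r => pvDecGo (k + 1) r
  | k, true :: r => k :: pvDecGo 0 r

theorem pvDecGo_replicate : ∀ (m k : Nat) (r : List Bool),
    pvDecGo k (List.replicate m false ++ r) = pvDecGo (k + m) r := by
  intro m
  induction m with
  | zero => intro k r; simp
  | succ n ih =>
    intro k r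
    rw [List.replicate_succ, List.cons_append]
    show pvDecGo (k + 1) _ = _
    rw [ih]
    congr 1; omega

theorem pvDecode_g : ∀ (lens : List Nat), lens ≠ [] → (∀ n ∈ lens, 0 < n) →
    pvDecGo 0 (pvG lens) = lens := by
  intro lens
  induction lens with
  | nil => intro h; exact absurd rfl h
  | cons n tl ih =>
    intro _ hpos
    cases tl with
    | nil =>
      simp only [pvG, List.map_cons, List.map_nil]
      rw [show List.intercalate [true] [List.replicate n false] = List.replicate n false from by simp [List.intercalate]]
      rw [← List.append_nil (List.replicate n false), pvDecGo_replicate]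
      simp [pvDecGo]
    | cons m tl2 =>
      simp only [pvG, List.map_cons]
      rw [show List.intercalate [true] (List.replicate n false :: (List.replicate m false :: tl2.map (fun n => List.replicate n false))) = List.replicate n false ++ (true :: List.intercalate [true] (List.replicate m false :: tl2.map (fun n => List.replicate n false))) from by simp [List.intercalate]]
      rw [pvDecGo_replicate]
      show (0 + n) :: pvDecGo 0 (pvG (m :: tl2)) = _
      rw [ih (by simp) (fun x hx => hpos x (List.mem_cons_of_mem _ hx))]
      congr 1; omega

theorem pvG_inj (lens : List Nat) (hpos : ∀ n ∈ lens, 0 < n)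
    (h : pvG lens = pvG [3, 5, 5, 3, 5, 4, 3, 4, 3]) : lens = [3, 5, 5, 3, 5, 4, 3, 4, 3] := by
  cases hn : lens with
  | nil =>
    subst hn
    have he : pvG [] = [] := by simp [pvG, List.intercalate]
    rw [he] at h
    exact absurd h.symm (by decide)
  | cons a tl =>
    subst hn
    have hd := pvDecode_g (a :: tl) (by simp) hpos
    rw [h] at hd
    rw [show pvDecGo 0 (pvG [3, 5, 5, 3, 5, 4, 3, 4, 3]) = [3, 5, 5, 3, 5, 4, 3, 4, 3] from by decide] at hd
    exact hd.symm

theorem pvProf_eq_iff (cs ps : List Char) :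
    pvProf cs = pvProf ps ↔
      (cs.length = ps.length ∧ ∀ pr ∈ cs.zip ps, (pr.1 = ' ' ↔ pr.2 = ' ')) := by
  constructor
  · intro h
    have hl : cs.length = ps.length := by
      have := congrArg List.length h; simpa [pvProf] using this
    refine ⟨hl, ?_⟩
    intro pr hpr
    obtain ⟨i, h1, h2, hpr⟩ := pvMemZip.1 hpr
    have := congrArg (fun l => l[i]?) h
    simp only [pvProf, List.getElem?_map] at this
    rw [List.getElem?_eq_getElem h1, List.getElem?_eq_getElem h2] at this
    simp only [Option.map_some, Option.some.injEq, decide_eq_decide] at this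
    subst hpr
    simpa using this
  · rintro ⟨hl, hal⟩
    apply List.ext_getElem (by simpa [pvProf] using hl)
    intro i h1 h2
    simp only [pvProf, List.getElem_map]
    simp only [pvProf, List.length_map] at h1 h2
    have := hal (cs[i], ps[i]) (pvMemZip.2 ⟨i, h1, h2, rfl⟩)
    simpa [decide_eq_decide] using this

-- ---- concrete facts about the plaintext ----

def pvPws : List (List Char) := PySem.Chars.split₀ pvBplainText.toList
def pvLensP : List Nat := [3, 5, 5, 3, 5, 4, 3, 4, 3]

theorem pvHPW : pvAplainWords.map String.toList = pvPws :=
  PySem.Str.split₀_map_toList pvAplainText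

theorem pvHlensP : pvPws.map List.length = pvLensP := by decide

theorem pvHPjoin : List.intercalate [' '] pvPws = pvBplainText.toList := by decide

theorem pvNoSpaceWord (s : List Char) (w : List Char) (hw : w ∈ PySem.Chars.split₀ s) :
    ∀ c ∈ w, c ≠ ' ' := by
  intro c hc hsp
  have := (pvSplitWords s w hw).2 c hc
  rw [hsp] at this
  exact absurd this (by decide)

theorem pvPosWord (s : List Char) (w : List Char) (hw : w ∈ PySem.Chars.split₀ s) :
    0 < w.length := by
  have := (pvSplitWords s w hw).1
  cases w
  · exact absurd rfl this
  · simp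

theorem pvProfWord (w : List Char) (h : ∀ c ∈ w, c ≠ ' ') :
    pvProf w = List.replicate w.length false := by
  have h1 : w.map (fun c => decide (c = ' ')) = w.map (fun _ => false) :=
    List.map_congr_left (fun c hc => by simp [h c hc])
  show w.map (fun c => decide (c = ' ')) = _
  rw [h1]
  simp

-- ---- per-line equivalence ----

def pvDRel (dA dB : PySem.Dict Char Char) : Prop :=
  (∀ c, c ≠ ' ' → dA.get? c = dB.get? c) ∧ dB.get? ' ' = some ' '


-- ---- per-line glue: abbreviations ----

def pvLws (line : String) : List (List Char) := (PySem.Str.split₀ line).map String.toList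

def pvJ (line : String) : List Char := List.intercalate [' '] (pvLws line)

def pvFlatL (line : String) : List (Char × Char) :=
  ((pvLws line).zip pvPws).flatMap (fun q => q.1.zip q.2)

theorem pvJoinedList (line : String) :
    (PySem.Str.join " " (PySem.Str.split₀ line)).toList = pvJ line := by
  rw [PySem.Str.toList_join]
  simp [PySem.Chars.join, pvJ, pvLws]

theorem pvFlatEq (line : String) :
    ((PySem.Str.split₀ line).zip pvAplainWords).flatMap (fun pr => pr.1.toList.zip pr.2.toList)
      = pvFlatL line := by
  unfold pvFlatL pvLws
  rw [← pvHPW, List.zip_map]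
  rw [List.flatMap_map]
  rfl

theorem pvZipOfMapEq {α β : Type} (f : α → β) (l l' : List α) (h : l.map f = l'.map f) :
    ∀ pr ∈ l.zip l', f pr.1 = f pr.2 := by
  intro pr hpr
  obtain ⟨i, h1, h2, rfl⟩ := pvMemZip.1 hpr
  have := congrArg (fun t => t[i]?) h
  simp only [List.getElem?_map] at this
  rw [List.getElem?_eq_getElem h1, List.getElem?_eq_getElem h2] at this
  simpa using this

theorem pvCond12 (line : String) :
    ((PySem.Str.split₀ line).length = pvAplainWords.length ∧
      pvAlenLoop ((PySem.Str.split₀ line).zip pvAplainLengths) = true) ↔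
    (pvLws line).map List.length = pvLensP := by
  rw [show pvAplainLengths = pvAplainWords.map PySem.Str.len from rfl]
  rw [pvLenLoop_iff]
  unfold pvLws
  constructor
  · intro h
    rw [show (PySem.Str.split₀ line).map (fun w => w.toList.length) =
        ((PySem.Str.split₀ line).map String.toList).map List.length from by rw [List.map_map]; rfl] at h
    rw [h, show (pvAplainWords.map (fun w => w.toList.length)) =
        (pvAplainWords.map String.toList).map List.length from by rw [List.map_map]; rfl]
    rw [pvHPW, pvHlensP]
  · intro h
    rw [show (PySem.Str.split₀ line).map (fun w => w.toList.length) =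
        ((PySem.Str.split₀ line).map String.toList).map List.length from by rw [List.map_map]; rfl]
    rw [h, show (pvAplainWords.map (fun w => w.toList.length)) =
        (pvAplainWords.map String.toList).map List.length from by rw [List.map_map]; rfl]
    rw [pvHPW, pvHlensP]

theorem pvLwsSplit (line : String) : pvLws line = PySem.Chars.split₀ line.toList :=
  PySem.Str.split₀_map_toList line

theorem pvCondProf (line : String) :
    ((pvJ line).length = pvBplainText.toList.length ∧
      (∀ pr ∈ (pvJ line).zip pvBplainText.toList, (pr.1 = ' ' ↔ pr.2 = ' '))) ↔
    (pvLws line).map List.length = pvLensP := by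
  rw [← pvProf_eq_iff]
  have hJ : pvProf (pvJ line) = pvG ((pvLws line).map List.length) := by
    unfold pvJ pvG
    rw [pvProf_join]
    congr 1
    rw [List.map_map]
    apply List.map_congr_left
    intro w hw
    exact pvProfWord w (pvNoSpaceWord line.toList w (by rwa [← pvLwsSplit]))
  have hP : pvProf pvBplainText.toList = pvG pvLensP := by decide
  rw [hJ, hP]
  constructor
  · intro h
    apply pvG_inj _ ?_ (by rw [h]; rfl)
    intro n hn
    obtain ⟨w, hw, rfl⟩ := List.mem_map.1 hn
    exact pvPosWord line.toList w (by rwa [← pvLwsSplit])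
  · intro h
    rw [h]

theorem pvFlatNoSpace (line : String) :
    ∀ x ∈ pvFlatL line, x.1 ≠ ' ' ∧ x.2 ≠ ' ' := by
  intro x hx
  obtain ⟨q, hq, hxq⟩ := List.mem_flatMap.1 hx
  obtain ⟨a, b⟩ := x
  have hcomp := List.of_mem_zip hxq
  obtain ⟨w1, w2⟩ := q
  have hqm := List.of_mem_zip hq
  constructor
  · exact pvNoSpaceWord line.toList w1 (by rw [← pvLwsSplit]; exact hqm.1) a hcomp.1
  · exact pvNoSpaceWord pvBplainText.toList w2 (by simpa [pvPws] using hqm.2) b hcomp.2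

theorem pvMemJP (line : String) (hlens : (pvLws line).map List.length = pvLensP) :
    ∀ x, x ∈ (pvJ line).zip pvBplainText.toList ↔
      (x ∈ pvFlatL line ∨ x = (' ', ' ')) := by
  have hml : (pvLws line).map List.length = pvPws.map List.length := by
    rw [hlens, pvHlensP]
  have hz : (pvJ line).zip pvBplainText.toList =
      List.intercalate [(' ', ' ')] (((pvLws line).zip pvPws).map (fun q => q.1.zip q.2)) := by
    conv_lhs => rw [← pvHPjoin]
    exact pvZipJoin (pvLws line) pvPws hml
  have hlen9 : (pvLws line).length = 9 := by
    have := congrArg List.length hlens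
    simpa using this
  intro x
  rw [hz, pvMemIntercalate]
  unfold pvFlatL
  constructor
  · rintro (⟨l, hl, hxl⟩ | ⟨rfl, _⟩)
    · obtain ⟨q, hq, rfl⟩ := List.mem_map.1 hl
      exact Or.inl (List.mem_flatMap.2 ⟨q, hq, hxl⟩)
    · exact Or.inr rfl
  · rintro (hx | rfl)
    · obtain ⟨q, hq, hxq⟩ := List.mem_flatMap.1 hx
      exact Or.inl ⟨q.1.zip q.2, List.mem_map_of_mem hq, hxq⟩
    · refine Or.inr ⟨rfl, ?_⟩
      rw [List.length_map, List.length_zip, hlen9]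
      rw [show pvPws.length = 9 from by decide]
      omega

theorem pvCondOk (line : String) (hlens : (pvLws line).map List.length = pvLensP) :
    pvOk ((pvJ line).zip pvBplainText.toList) ↔ pvOk (pvFlatL line) := by
  have hmm := pvMemJP line hlens
  constructor
  · intro hok
    exact pvOk_of_subset (fun x hx => (hmm x).2 (Or.inl hx)) hok
  · intro hok a ha b hb
    rcases (hmm a).1 ha with haf | rfl
    · rcases (hmm b).1 hb with hbf | rfl
      · exact hok a haf b hbf
      · obtain ⟨h1, h2⟩ := pvFlatNoSpace line a haf
        exact iff_of_false h1 h2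
    · rcases (hmm b).1 hb with hbf | rfl
      · obtain ⟨h1, h2⟩ := pvFlatNoSpace line b hbf
        exact iff_of_false (fun h => h1 h.symm) (fun h => h2 h.symm)
      · exact ⟨fun _ => rfl, fun _ => rfl⟩

theorem pvWordLens (line : String) (hlens : (pvLws line).map List.length = pvLensP) :
    ∀ pr ∈ (PySem.Str.split₀ line).zip pvAplainWords, pr.1.toList.length = pr.2.toList.length := by
  have h : (PySem.Str.split₀ line).map (fun w => w.toList.length) =
      pvAplainWords.map (fun w => w.toList.length) := by
    rw [show (PySem.Str.split₀ line).map (fun w => w.toList.length) =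
        ((PySem.Str.split₀ line).map String.toList).map List.length from by rw [List.map_map]; rfl]
    rw [show (pvAplainWords.map (fun w => w.toList.length)) =
        (pvAplainWords.map String.toList).map List.length from by rw [List.map_map]; rfl]
    rw [pvHPW, pvHlensP]
    exact hlens
  exact pvZipOfMapEq _ _ _ h

theorem pvPlainSigSpec : pvBplainSig = pvSigSpec pvBplainText.toList := by
  unfold pvBplainSig
  exact pvBsig_eq_spec _

theorem pvLine_iff (line : String) :
    ((PySem.Str.split₀ line).length = pvAplainWords.length ∧
      pvAlenLoop ((PySem.Str.split₀ line).zip pvAplainLengths) = true ∧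
      (pvAwordLoop ((PySem.Str.split₀ line).zip pvAplainWords)
          PySem.Dict.empty PySem.Dict.empty).2.2 = true) ↔
    pvBsig (PySem.Str.join " " (PySem.Str.split₀ line)).toList = pvBplainSig := by
  rw [pvJoinedList line, pvBsig_eq_spec, pvPlainSigSpec, pvSigSpec_eq_iff]
  constructor
  · rintro ⟨h1, h2, h3⟩
    have hlens := (pvCond12 line).mp ⟨h1, h2⟩
    have hprof := (pvCondProf line).mpr hlens
    refine ⟨hprof.1, hprof.2, ?_⟩
    apply (pvCondOk line hlens).mpr
    rw [pvWordLoop_eq_charLoop _ _ _ (pvWordLens line hlens), pvFlatEq] at h3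
    exact (pvCharLoop_ok_iff _).mp h3
  · rintro ⟨h1, h2, h3⟩
    have hlens := (pvCondProf line).mp ⟨h1, h2⟩
    obtain ⟨hc1, hc2⟩ := (pvCond12 line).mpr hlens
    refine ⟨hc1, hc2, ?_⟩
    rw [pvWordLoop_eq_charLoop _ _ _ (pvWordLens line hlens), pvFlatEq]
    exact (pvCharLoop_ok_iff _).mpr ((pvCondOk line hlens).mp h3)

theorem pvLine_maps (line : String)
    (hacc : pvBsig (PySem.Str.join " " (PySem.Str.split₀ line)).toList = pvBplainSig)
    {dec enc : PySem.Dict Char Char}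
    (hA : pvAwordLoop ((PySem.Str.split₀ line).zip pvAplainWords)
        PySem.Dict.empty PySem.Dict.empty = (dec, enc, true)) :
    pvDRel dec
      (((PySem.Str.join " " (PySem.Str.split₀ line)).toList.zip pvBplainText.toList).foldl
        (fun d pr => d.insert pr.1 pr.2) PySem.Dict.empty) := by
  rw [pvJoinedList line]
  rw [pvJoinedList line, pvBsig_eq_spec, pvPlainSigSpec, pvSigSpec_eq_iff] at hacc
  obtain ⟨h1, h2, hokJ⟩ := hacc
  have hlens := (pvCondProf line).mp ⟨h1, h2⟩
  have hokF : pvOk (pvFlatL line) := (pvCondOk line hlens).mp hokJ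
  rw [pvWordLoop_eq_charLoop _ _ _ (pvWordLens line hlens), pvFlatEq] at hA
  obtain ⟨dec', enc', heq, hget⟩ := pvCharLoop_dict (pvFlatL line) hokF
  rw [heq] at hA
  have hdec : dec = dec' := by
    have := congrArg Prod.fst hA
    simpa using this.symm
  subst hdec
  constructor
  · intro c hc
    rw [hget c, pvBdict_get? hokJ]
    apply Option.eq_of_eq_some
    intro p
    rw [pvFstMap_eq_some_iff hokF, pvFstMap_eq_some_iff hokJ]
    constructor
    · intro hm
      exact (pvMemJP line hlens _).2 (Or.inl hm)
    · intro hm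
      rcases (pvMemJP line hlens _).1 hm with hm' | heq'
      · exact hm'
      · exact absurd (congrArg Prod.fst heq') (by simpa using hc)
  · rw [pvBdict_get? hokJ]
    rw [pvFstMap_eq_some_iff hokJ]
    exact (pvMemJP line hlens _).2 (Or.inr rfl)

-- ---- the find loops agree ----

theorem pvFind_rel : ∀ lines : List String,
    (pvAfind lines = none ∧ pvBfind lines = none) ∨
      (∃ dA dB, pvAfind lines = some dA ∧ pvBfind lines = some dB ∧ pvDRel dA dB) := by
  intro lines
  induction lines with
  | nil => exact Or.inl ⟨rfl, rfl⟩
  | cons line rest ih =>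
    by_cases hB : pvBsig (PySem.Str.join " " (PySem.Str.split₀ line)).toList = pvBplainSig
    · right
      obtain ⟨h1, h2, h3⟩ := (pvLine_iff line).mpr hB
      rcases hw : pvAwordLoop ((PySem.Str.split₀ line).zip pvAplainWords)
          PySem.Dict.empty PySem.Dict.empty with ⟨dec, enc, ok⟩
      have hok : ok = true := by rw [hw] at h3; exact h3
      subst hok
      refine ⟨dec, _, ?_, ?_, pvLine_maps line hB hw⟩
      · show pvAfind (line :: rest) = some dec
        simp only [pvAfind]
        rw [if_neg (by simp [h1]), if_neg (by simp [h2]), hw]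
      · show pvBfind (line :: rest) = some _
        simp only [pvBfind]
        rw [if_pos hB]
    · have hA3 : ¬ ((PySem.Str.split₀ line).length = pvAplainWords.length ∧
          pvAlenLoop ((PySem.Str.split₀ line).zip pvAplainLengths) = true ∧
          (pvAwordLoop ((PySem.Str.split₀ line).zip pvAplainWords)
              PySem.Dict.empty PySem.Dict.empty).2.2 = true) :=
        fun hc => hB ((pvLine_iff line).mp hc)
      have hAstep : pvAfind (line :: rest) = pvAfind rest := by
        simp only [pvAfind]
        by_cases h1 : (PySem.Str.split₀ line).length = pvAplainWords.length
        · rw [if_neg (by simp [h1])]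
          by_cases h2 : pvAlenLoop ((PySem.Str.split₀ line).zip pvAplainLengths) = true
          · rw [if_neg (by simp [h2])]
            rcases hw : pvAwordLoop ((PySem.Str.split₀ line).zip pvAplainWords)
                PySem.Dict.empty PySem.Dict.empty with ⟨dec, enc, ok⟩
            cases ok
            · rfl
            · exact absurd ⟨h1, h2, by rw [hw]⟩ hA3
          · rw [if_pos (by simpa using h2)]
        · rw [if_pos h1]
      have hBstep : pvBfind (line :: rest) = pvBfind rest := by
        simp only [pvBfind]
        rw [if_neg hB]
      rw [hAstep, hBstep]
      exact ih

-- ---- phase 2 agrees for related dicts ----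

theorem pvDecLine_rel {dA dB : PySem.Dict Char Char} (h : pvDRel dA dB) :
    ∀ (l : List Char) (acc : List Char),
      pvAdecLine dA l acc = (pvBdecLine dB l).map (fun cs => acc ++ cs) := by
  intro l
  induction l with
  | nil => intro acc; simp [pvAdecLine, pvBdecLine]
  | cons ch rest ih =>
    intro acc
    by_cases hsp : ch = ' '
    · subst hsp
      rw [show pvAdecLine dA (' ' :: rest) acc = pvAdecLine dA rest (acc ++ [' ']) from by
        simp [pvAdecLine]]
      rw [show pvBdecLine dB (' ' :: rest) = (pvBdecLine dB rest).map (' ' :: ·) from by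
        simp [pvBdecLine, h.2]]
      rw [ih]
      rcases pvBdecLine dB rest with _ | cs <;> simp
    · have hget : dA.get? ch = dB.get? ch := h.1 ch hsp
      rcases hbd : dB.get? ch with _ | p
      · have hcontains : dA.contains ch = false := by
          rw [PySem.Dict.contains_eq_isSome_get?, hget, hbd]; rfl
        rw [show pvAdecLine dA (ch :: rest) acc = none from by
          simp [pvAdecLine, hsp, hcontains]]
        rw [show pvBdecLine dB (ch :: rest) = none from by simp [pvBdecLine, hbd]]
        rfl
      · have hcontains : dA.contains ch = true := by
          rw [PySem.Dict.contains_eq_isSome_get?, hget, hbd]; rfl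
        have hgd : dA.getD ch ' ' = p := by
          rw [PySem.Dict.getD_eq_get?_getD, hget, hbd]; rfl
        rw [show pvAdecLine dA (ch :: rest) acc = pvAdecLine dA rest (acc ++ [p]) from by
          simp [pvAdecLine, hsp, hcontains, hgd]]
        rw [show pvBdecLine dB (ch :: rest) = (pvBdecLine dB rest).map (p :: ·) from by
          simp [pvBdecLine, hbd]]
        rw [ih]
        rcases pvBdecLine dB rest with _ | cs <;> simp

theorem pvDecCase_rel {dA dB : PySem.Dict Char Char} (h : pvDRel dA dB) :
    ∀ (lines : List String) (acc : List String),
      pvAdecCase dA lines acc =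
        (match pvBdecCase dB lines with
          | some ls => acc ++ ls
          | none => ["No solution."]) := by
  intro lines
  induction lines with
  | nil => intro acc; simp [pvAdecCase, pvBdecCase]
  | cons line rest ih =>
    intro acc
    have hline := pvDecLine_rel h line.toList []
    rcases hbl : pvBdecLine dB line.toList with _ | cs
    · rw [hbl] at hline
      rw [show pvAdecCase dA (line :: rest) acc = ["No solution."] from by
        simp [pvAdecCase, hline]]
      rw [show pvBdecCase dB (line :: rest) = none from by simp [pvBdecCase, hbl]]
    · rw [hbl] at hline
      simp only [Option.map_some, List.nil_append] at hline
      rw [show pvAdecCase dA (line :: rest) acc =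
          pvAdecCase dA rest (acc ++ [String.ofList cs]) from by
        simp [pvAdecCase, hline]]
      rw [show pvBdecCase dB (line :: rest) =
          (pvBdecCase dB rest).map (String.ofList cs :: ·) from by
        simp [pvBdecCase, hbl]]
      rw [ih]
      rcases pvBdecCase dB rest with _ | ls <;> simp

-- ---- assembling the per-case results ----

theorem pv_main (cse : List String) :
    (match pvAfind cse with
      | some dmap => pvAdecCase dmap cse []
      | none => ["No solution."]) = pvBdecryptCase cse := by
  unfold pvBdecryptCase
  rcases pvFind_rel cse with ⟨hA, hB⟩ | ⟨dA, dB, hA, hB, hrel⟩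
  · rw [hA, hB]
  · rw [hA, hB]
    simp only []
    rw [pvDecCase_rel hrel cse []]
    rcases pvBdecCase dB cse with _ | ls <;> simp

theorem pv_top : ∀ (cs : List (List String)) (acc : List (List String)),
    List.foldl (fun results currentCase =>
      results ++ [match pvAfind currentCase with
        | some dmap => pvAdecCase dmap currentCase []
        | none => ["No solution."]]) acc cs = acc ++ cs.map pvBdecryptCase
  | [], acc => by simp
  | cse :: rest, acc => by
    simp only [List.foldl, List.map]
    rw [pv_top rest, pv_main cse]
    simp

-- ===== VERDICT (by name: the statement is the Claim_ definition above) =====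
theorem decrypt_texts_spec : Claim_equal_decrypt_texts := by
  intro cases _
  unfold Spec_decrypt_texts decrypt_texts decrypt_texts_alt
  rw [pv_top]
  simp
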